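-- pv_equiv track=rewrite | github.com/sudog1/Algorithm | 프로그래머스/unrated/133499. 옹알이 （2）/옹알이 （2）.py | solution
-- ===== SOURCE A (Python) =====
-- def solution(babbling):
--     pron = {'aya', 'ye', 'woo', 'ma'}
--     count = 0
--     for word in babbling:
--         idx = 0
--         prev = ''
--         while idx <= len(word):
--             if word[idx:idx+2] in pron and prev != word[idx:idx+2]:
--                 prev = word[idx:idx+2]
--                 idx += 2
--                 continue
--             if word[idx:idx+3] in pron and prev != word[idx:idx+3]:
--                 prev = word[idx:idx+3]
--                 idx += 3
--                 continue
--             else: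
--                 break
--         if idx == len(word):
--             count += 1
--     return count
-- ===== SOURCE B (Python) =====
-- def solution(babbling):
--     toks = ('aya', 'ye', 'woo', 'ma')
--
--     def tokenize(word):
--         out = []
--         i = 0
--         while i < len(word):
--             for t in toks:
--                 if word.startswith(t, i):
--                     out.append(t)
--                     i += len(t)
--                     break
--             else:
--                 return out, word[i:]
--         return out, ''
--
--     def ok(word):
--         tokens, rest = tokenize(word)
--         return rest == '' and all(a != b for a, b in zip(tokens, tokens[1:]))
--
--     return sum(ok(w) for w in babbling)
-- ===== Notes on version B (the rewrite author's own statement) =====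
-- stated objective: simpler
-- what changed: B replaces A's interleaved parse-while-checking-prev character loop (slice/set-membership plus prev tracking with early break) with a two-pass decomposition: greedily tokenize each word into the allowed syllables, then separately validate full coverage (no leftover suffix) and no adjacent repeated token.
import Mathlib
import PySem

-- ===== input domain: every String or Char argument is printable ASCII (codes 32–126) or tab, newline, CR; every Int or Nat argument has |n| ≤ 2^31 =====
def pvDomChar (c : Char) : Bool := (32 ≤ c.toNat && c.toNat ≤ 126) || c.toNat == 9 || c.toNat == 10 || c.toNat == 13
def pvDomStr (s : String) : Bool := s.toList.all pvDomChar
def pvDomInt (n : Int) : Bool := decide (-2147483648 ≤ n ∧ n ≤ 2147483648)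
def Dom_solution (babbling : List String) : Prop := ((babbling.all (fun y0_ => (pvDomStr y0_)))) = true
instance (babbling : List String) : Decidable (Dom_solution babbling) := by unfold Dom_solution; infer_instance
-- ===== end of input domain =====

-- B replaces A's interleaved parse-while-checking-prev char loop with a two-pass
-- decomposition (tokenize the word greedily, then validate full coverage and no
-- adjacent repeated token); objective: simpler, same cost.

-- ===== PORT A =====
-- A's pron set {'aya','ye','woo','ma'}; membership tested on slices of the word.
def pronA : List (List Char) := [['a','y','a'], ['y','e'], ['w','o','o'], ['m','a']]

-- A's inner while loop: returns the final idx. word[idx:idx+k] is (drop idx).take k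
-- (PySem.List.slice_natCast_add: exact for Nat idx, which never goes negative here).
def loopA (w : List Char) (idx : Nat) (prev : List Char) : Nat :=
  if idx ≤ w.length then
    if ((w.drop idx).take 2 ∈ pronA ∧ prev ≠ (w.drop idx).take 2) then
      loopA w (idx + 2) ((w.drop idx).take 2)
    else if ((w.drop idx).take 3 ∈ pronA ∧ prev ≠ (w.drop idx).take 3) then
      loopA w (idx + 3) ((w.drop idx).take 3)
    else idx
  else idx
termination_by w.length + 1 - idx
decreasing_by all_goals omega

def solution (babbling : List String) : Int :=
  babbling.foldl
    (fun count word =>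
      if loopA word.toList 0 [] = word.toList.length then count + 1 else count) 0

-- ===== PORT B =====
def toksB : List (List Char) := [['a','y','a'], ['y','e'], ['w','o','o'], ['m','a']]

-- every token is nonempty (used for termination of tokB)
theorem toksB_len_pos : ∀ t ∈ toksB, 0 < t.length := by decide

-- Source B's tokenize: walk i through the word; the for/else over toks is a first-match
-- search (List.find? with word.startswith(t, i) = t.isPrefixOf (w.drop i)).
def tokB (w : List Char) (i : Nat) (out : List (List Char)) :
    List (List Char) × List Char :=
  if h : i < w.length then
    match hf : toksB.find? (fun t => t.isPrefixOf (w.drop i)) with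
    | some t => tokB w (i + t.length) (out ++ [t])
    | none => (out, w.drop i)
  else (out, [])
termination_by w.length - i
decreasing_by
  have := toksB_len_pos _ (List.mem_of_find?_eq_some hf)
  omega

-- Source B's ok(word)
def okB (w : List Char) : Bool :=
  let r := tokB w 0 []
  r.2 == [] && (r.1.zip (r.1.drop 1)).all (fun p => p.1 != p.2)

def solution_alt (babbling : List String) : Int :=
  babbling.foldl (fun c word => c + (if okB word.toList then 1 else 0)) 0

-- ===== PRECONDITION & SPEC =====
def Spec_solution (babbling : List String) (out : Int) : Prop := out = solution_alt babbling
instance (babbling : List String) (out : Int) : Decidable (Spec_solution babbling out) := by unfold Spec_solution; infer_instance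

-- ===== CLAIM (what is proved, stated in full; the proofs are below) =====
def Claim_equal_solution : Prop := ∀ (babbling : List String), Dom_solution babbling → Spec_solution babbling (solution babbling)

-- ===== LEMMAS AND PROOFS =====

-- A's prev-tracking, as a predicate on B's token list: no token equals its predecessor.
def chainD (p : List Char) : List (List Char) → Bool
  | [] => true
  | t :: ts => (t != p) && chainD t ts

-- one-step unfoldings of tokB
theorem tokB_step_some {w : List Char} {i : Nat} {t : List Char} (out : List (List Char))
    (h : i < w.length) (hf : toksB.find? (fun t => t.isPrefixOf (w.drop i)) = some t) :
    tokB w i out = tokB w (i + t.length) (out ++ [t]) := by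
  rw [tokB]
  simp only [dif_pos h]
  split
  · rename_i t' hf2; rw [hf2] at hf; cases hf; rfl
  · rename_i hf2; rw [hf2] at hf; cases hf

theorem tokB_step_none {w : List Char} {i : Nat} (out : List (List Char))
    (h : i < w.length) (hf : toksB.find? (fun t => t.isPrefixOf (w.drop i)) = none) :
    tokB w i out = (out, w.drop i) := by
  rw [tokB]
  simp only [dif_pos h]
  split
  · rename_i t' hf2; rw [hf2] at hf; cases hf
  · rfl

theorem tokB_stop {w : List Char} {i : Nat} (out : List (List Char))
    (h : ¬ i < w.length) : tokB w i out = (out, []) := by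
  rw [tokB]
  simp only [dif_neg h]

theorem tokB_acc_aux (w : List Char) :
    ∀ n i out, w.length - i ≤ n →
      tokB w i out = (out ++ (tokB w i []).1, (tokB w i []).2) := by
  intro n
  induction n with
  | zero =>
      intro i out hn
      have h : ¬ i < w.length := by omega
      rw [tokB_stop out h, tokB_stop [] h]
      simp
  | succ n ih =>
      intro i out hn
      by_cases h : i < w.length
      · cases hf : toksB.find? (fun t => t.isPrefixOf (w.drop i)) with
        | some t =>
            have hpos := toksB_len_pos _ (List.mem_of_find?_eq_some hf)
            rw [tokB_step_some out h hf, tokB_step_some [] h hf]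
            simp only [List.nil_append]
            rw [ih (i + t.length) (out ++ [t]) (by omega), ih (i + t.length) [t] (by omega)]
            simp
        | none =>
            rw [tokB_step_none out h hf, tokB_step_none [] h hf]
            simp
      · rw [tokB_stop out h, tokB_stop [] h]
        simp

theorem tokB_acc (w : List Char) (i : Nat) (out : List (List Char)) :
    tokB w i out = (out ++ (tokB w i []).1, (tokB w i []).2) :=
  tokB_acc_aux w (w.length - i) i out le_rfl

theorem tokB_mem_aux (w : List Char) :
    ∀ n i, w.length - i ≤ n → ∀ t ∈ (tokB w i []).1, t ∈ toksB := by
  intro n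
  induction n with
  | zero =>
      intro i hn t ht
      have h : ¬ i < w.length := by omega
      rw [tokB_stop [] h] at ht
      simp at ht
  | succ n ih =>
      intro i hn t ht
      by_cases h : i < w.length
      · cases hf : toksB.find? (fun t => t.isPrefixOf (w.drop i)) with
        | some t' =>
            have ht' := List.mem_of_find?_eq_some hf
            have hpos := toksB_len_pos _ ht'
            rw [tokB_step_some [] h hf] at ht
            simp only [List.nil_append] at ht
            rw [tokB_acc w (i + t'.length) [t']] at ht
            simp at ht
            rcases ht with rfl | ht
            · exact ht'
            · exact ih (i + t'.length) (by omega) t ht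
        | none =>
            rw [tokB_step_none [] h hf] at ht
            simp at ht
      · rw [tokB_stop [] h] at ht
        simp at ht

theorem tokB_mem (w : List Char) : ∀ t ∈ (tokB w 0 []).1, t ∈ toksB :=
  tokB_mem_aux w w.length 0 (by omega)

theorem chainD_cons (t : List Char) (ts : List (List Char)) :
    chainD t ts = ((t :: ts).zip ((t :: ts).drop 1)).all (fun p => p.1 != p.2) := by
  induction ts generalizing t with
  | nil => rfl
  | cons t2 ts2 ih =>
      simp only [chainD, List.drop_succ_cons, List.drop_zero, List.zip_cons_cons,
        List.all_cons, ih t2]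
      rw [bne_comm]

theorem chainD_eq_zip (ts : List (List Char)) (h : ∀ t ∈ ts, t ≠ []) :
    chainD [] ts = (ts.zip (ts.drop 1)).all (fun p => p.1 != p.2) := by
  cases ts with
  | nil => rfl
  | cons t ts =>
      have hne : (t != ([] : List Char)) = true := by
        simpa using h t (by simp)
      simp only [chainD, hne, Bool.true_and]
      exact chainD_cons t ts

theorem key (w : List Char) :
    ∀ n idx prev, w.length - idx ≤ n → idx ≤ w.length →
      ((loopA w idx prev = w.length) ↔
        ((tokB w idx []).2 = [] ∧ chainD prev (tokB w idx []).1 = true)) := by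
  intro n
  induction n with
  | zero =>
      intro idx prev hn hle
      have hidx : idx = w.length := by omega
      have h : ¬ idx < w.length := by omega
      rw [tokB_stop [] h]
      have hdrop : w.drop idx = [] := by
        apply List.drop_eq_nil_of_le; omega
      rw [loopA, if_pos hle, hdrop]
      simp [pronA, chainD, hidx]
  | succ n ih =>
      intro idx prev hn hle
      by_cases h : idx < w.length
      · cases hf : toksB.find? (fun t => t.isPrefixOf (w.drop idx)) with
        | none =>
            have hnone := List.find?_eq_none.mp hf
            have hpref : ∀ t ∈ pronA, ¬ (w.drop idx).take 2 = t ∧ ¬ (w.drop idx).take 3 = t := by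
              intro t htm
              constructor <;> intro he <;>
                exact hnone t htm (by
                  rw [List.isPrefixOf_iff_prefix, ← he]
                  exact List.take_prefix _ _)
            rw [tokB_step_none [] h hf]
            rw [loopA, if_pos hle]
            rw [if_neg (by rintro ⟨hm, _⟩; exact (hpref _ hm).1 rfl)]
            rw [if_neg (by rintro ⟨hm, _⟩; exact (hpref _ hm).2 rfl)]
            have hner : w.drop idx ≠ [] := by
              intro he
              have := congrArg List.length he
              simp at this
              omega
            constructor
            · intro he; omega
            · rintro ⟨he, -⟩; exact absurd he hner
        | some t =>
            have htmem := List.mem_of_find?_eq_some hf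
            have hpref : t <+: w.drop idx := by
              have := List.find?_some hf
              rwa [List.isPrefixOf_iff_prefix] at this
            obtain ⟨r', hr⟩ := hpref
            rw [tokB_step_some [] h hf]
            simp only [List.nil_append]
            rw [tokB_acc w (idx + t.length) [t]]
            rw [loopA, if_pos hle]
            fin_cases htmem
            -- t = ['a','y','a']
            · have hlr : w.length - idx = 3 + r'.length := by
                have := congrArg List.length hr; simp at this; omega
              have h2 : (w.drop idx).take 2 = ['a','y'] := by rw [← hr]; rfl
              have h3 : (w.drop idx).take 3 = ['a','y','a'] := by rw [← hr]; rfl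
              rw [h2, h3, show (['a','y','a'] : List Char).length = 3 from rfl]
              rw [if_neg (by rintro ⟨hm, -⟩; revert hm; decide)]
              by_cases hp : prev = ['a','y','a']
              · rw [if_neg (by rintro ⟨-, hne⟩; exact hne hp)]
                constructor
                · intro he; omega
                · rintro ⟨-, hch⟩; rw [hp] at hch; simp [chainD] at hch
              · rw [if_pos ⟨by decide, hp⟩]
                rw [ih (idx + 3) ['a','y','a'] (by omega) (by omega)]
                have hp' : ((['a','y','a'] : List Char) != prev) = true := by
                  simp [bne_iff_ne]; exact fun he => hp he.symm
                simp [chainD, hp']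
            -- t = ['y','e']
            · have hlr : w.length - idx = 2 + r'.length := by
                have := congrArg List.length hr; simp at this; omega
              have h2 : (w.drop idx).take 2 = ['y','e'] := by rw [← hr]; rfl
              rw [h2, show (['y','e'] : List Char).length = 2 from rfl]
              by_cases hp : prev = ['y','e']
              · rw [if_neg (by rintro ⟨-, hne⟩; exact hne hp)]
                cases r' with
                | nil =>
                    have h3 : List.take 3 (List.drop idx w) = ['y','e'] := by rw [← hr]; rfl
                    rw [h3, if_neg (by rintro ⟨-, hne⟩; exact hne hp)]
                    simp at hlr
                    constructor
                    · intro he; omega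
                    · rintro ⟨-, hch⟩; rw [hp] at hch; simp [chainD] at hch
                | cons c r'' =>
                    have h3 : List.take 3 (List.drop idx w) = ['y','e',c] := by rw [← hr]; rfl
                    rw [h3, if_neg (by rintro ⟨hm, -⟩; revert hm; simp [pronA])]
                    simp at hlr
                    constructor
                    · intro he; omega
                    · rintro ⟨-, hch⟩; rw [hp] at hch; simp [chainD] at hch
              · rw [if_pos ⟨by decide, hp⟩]
                rw [ih (idx + 2) ['y','e'] (by omega) (by omega)]
                have hp' : ((['y','e'] : List Char) != prev) = true := by
                  simp [bne_iff_ne]; exact fun he => hp he.symm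
                simp [chainD, hp']
            -- t = ['w','o','o']
            · have hlr : w.length - idx = 3 + r'.length := by
                have := congrArg List.length hr; simp at this; omega
              have h2 : (w.drop idx).take 2 = ['w','o'] := by rw [← hr]; rfl
              have h3 : (w.drop idx).take 3 = ['w','o','o'] := by rw [← hr]; rfl
              rw [h2, h3, show (['w','o','o'] : List Char).length = 3 from rfl]
              rw [if_neg (by rintro ⟨hm, -⟩; revert hm; decide)]
              by_cases hp : prev = ['w','o','o']
              · rw [if_neg (by rintro ⟨-, hne⟩; exact hne hp)]
                constructor
                · intro he; omega
                · rintro ⟨-, hch⟩; rw [hp] at hch; simp [chainD] at hch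
              · rw [if_pos ⟨by decide, hp⟩]
                rw [ih (idx + 3) ['w','o','o'] (by omega) (by omega)]
                have hp' : ((['w','o','o'] : List Char) != prev) = true := by
                  simp [bne_iff_ne]; exact fun he => hp he.symm
                simp [chainD, hp']
            -- t = ['m','a']
            · have hlr : w.length - idx = 2 + r'.length := by
                have := congrArg List.length hr; simp at this; omega
              have h2 : (w.drop idx).take 2 = ['m','a'] := by rw [← hr]; rfl
              rw [h2, show (['m','a'] : List Char).length = 2 from rfl]
              by_cases hp : prev = ['m','a']
              · rw [if_neg (by rintro ⟨-, hne⟩; exact hne hp)]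
                cases r' with
                | nil =>
                    have h3 : List.take 3 (List.drop idx w) = ['m','a'] := by rw [← hr]; rfl
                    rw [h3, if_neg (by rintro ⟨-, hne⟩; exact hne hp)]
                    simp at hlr
                    constructor
                    · intro he; omega
                    · rintro ⟨-, hch⟩; rw [hp] at hch; simp [chainD] at hch
                | cons c r'' =>
                    have h3 : List.take 3 (List.drop idx w) = ['m','a',c] := by rw [← hr]; rfl
                    rw [h3, if_neg (by rintro ⟨hm, -⟩; revert hm; simp [pronA])]
                    simp at hlr
                    constructor
                    · intro he; omega
                    · rintro ⟨-, hch⟩; rw [hp] at hch; simp [chainD] at hch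
              · rw [if_pos ⟨by decide, hp⟩]
                rw [ih (idx + 2) ['m','a'] (by omega) (by omega)]
                have hp' : ((['m','a'] : List Char) != prev) = true := by
                  simp [bne_iff_ne]; exact fun he => hp he.symm
                simp [chainD, hp']
      · have hidx : idx = w.length := by omega
        have h' : ¬ idx < w.length := h
        rw [tokB_stop [] h']
        have hdrop : w.drop idx = [] := by
          apply List.drop_eq_nil_of_le; omega
        rw [loopA, if_pos hle, hdrop]
        simp [pronA, chainD, hidx]

theorem perWord (w : List Char) :
    (loopA w 0 [] = w.length) ↔ okB w = true := by
  have hne : ∀ t ∈ (tokB w 0 []).1, t ≠ [] := by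
    intro t ht he
    have := toksB_len_pos t (tokB_mem w t ht)
    rw [he] at this
    simp at this
  rw [key w w.length 0 [] (by omega) (by omega)]
  show _ ↔ ((tokB w 0 []).2 == [] &&
      ((tokB w 0 []).1.zip ((tokB w 0 []).1.drop 1)).all (fun p => p.1 != p.2)) = true
  rw [← chainD_eq_zip _ hne]
  simp [Bool.and_eq_true]

-- ===== VERDICT (by name: the statement is the Claim_ definition above) =====
theorem solution_spec : Claim_equal_solution := by
  intro babbling _
  unfold Spec_solution solution solution_alt
  have hstep :
      (fun (count : Int) (word : String) =>
          if loopA word.toList 0 [] = word.toList.length then count + 1 else count)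
        = fun c word => c + (if okB word.toList then 1 else 0) := by
    funext c word
    by_cases h : loopA word.toList 0 [] = word.toList.length
    · rw [if_pos h, if_pos ((perWord _).mp h)]
    · rw [if_neg h, if_neg (fun hb => h ((perWord _).mpr hb)), add_zero]
  rw [hstep]
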